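-- pv_equiv track=rewrite | github.com/NariakiShipo/Pyrhon_HomeworkLists | src/HW23.py | organize_hand
-- ===== SOURCE A (Python) =====
-- def get_card_rank(card: str):
--     if card == "Joker":
--         return "Joker"
--     return card[1:]
--
-- def organize_hand(hand: list)-> list:
--     num = [get_card_rank(card) for card in hand]
--     repeatcard = set()
--     for i in range(len(num)):
--         for j in range(i + 1, len(num)):
--             if i not in repeatcard and j not in repeatcard:
--                 if num[i] == num[j]:
--                     repeatcard.add(i)
--                     repeatcard.add(j)
--     repeatcard = sorted(repeatcard, reverse=True)
--     for index in repeatcard: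
--         hand.pop(index)
--     return hand
-- ===== SOURCE B (Python) =====
-- def get_card_rank(card: str):
--     if card == "Joker":
--         return "Joker"
--     return card[1:]
--
-- def organize_hand(hand: list) -> list:
--     counts = {}
--     for card in hand:
--         r = get_card_rank(card)
--         counts[r] = counts.get(r, 0) + 1
--     seen = set()
--     keep = []
--     for card in reversed(hand):
--         r = get_card_rank(card)
--         if counts[r] % 2 == 1 and r not in seen:
--             keep.append(card)
--         seen.add(r)
--     keep.reverse()
--     hand[:] = keep
--     return hand
-- ===== Notes on version B (the rewrite author's own statement) =====
-- stated objective: faster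
-- what changed: A pairs equal-rank cards with O(n^2) nested index loops over the rank list and then pops the paired indices one by one; B builds a rank counter in one pass and does a single reverse sweep with a seen-set, keeping a card iff its rank's total count is odd and it is the last card of that rank, rebuilding the hand in order.
import Mathlib
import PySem

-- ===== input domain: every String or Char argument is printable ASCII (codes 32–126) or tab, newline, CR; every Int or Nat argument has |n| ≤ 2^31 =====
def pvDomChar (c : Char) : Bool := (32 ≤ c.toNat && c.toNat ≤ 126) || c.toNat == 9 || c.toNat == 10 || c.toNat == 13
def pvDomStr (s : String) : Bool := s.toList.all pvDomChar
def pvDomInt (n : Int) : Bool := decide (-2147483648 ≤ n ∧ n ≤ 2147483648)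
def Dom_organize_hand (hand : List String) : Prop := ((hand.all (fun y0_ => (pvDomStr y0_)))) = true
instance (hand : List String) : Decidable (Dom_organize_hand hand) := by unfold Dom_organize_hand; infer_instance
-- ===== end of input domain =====

-- B replaces A's quadratic index-pairing loops by a one-pass rank counter plus a single reverse
-- sweep with a seen-set (objective: faster). Both A and B mutate `hand` in place in Python
-- (A pops, B assigns hand[:]); the equivalence proved here is about the returned value.

-- ===== PORT A =====
def get_card_rank (card : String) : String :=
  if card = "Joker" then "Joker" else PySem.Str.slice card (some 1) none

def pvInnerStep (num : List String) (i : Int) (S : PySem.Set Int) (j : Int) : PySem.Set Int :=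
  if i ∉ S ∧ j ∉ S then
    if PySem.List.pyGetD num i "" = PySem.List.pyGetD num j "" then (S.add i).add j else S
  else S

def pvOuterStep (num : List String) (S : PySem.Set Int) (i : Int) : PySem.Set Int :=
  (PySem.List.pyRange (i + 1) (PySem.List.len num) 1).foldl (pvInnerStep num i) S

def pvRepeatSet (num : List String) : PySem.Set Int :=
  (PySem.List.pyRange 0 (PySem.List.len num) 1).foldl (pvOuterStep num) PySem.Set.empty

-- hand.pop(index); the indices A pops are always in range, so the `none` branch is unreachable
def pvPopAll (h : List String) (l : List Int) : List String :=
  l.foldl (fun h index =>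
    match PySem.List.pop? h index with
    | some r => r.2
    | none => h) h

def organize_hand (hand : List String) : List String :=
  let num := hand.map (fun card => get_card_rank card)
  let repeatcard := pvRepeatSet num
  pvPopAll hand (PySem.List.sorted repeatcard (fun x => x) true)

-- ===== PORT B =====
def pvCounts (hand : List String) : PySem.Dict String Int :=
  hand.foldl (fun d card =>
    d.insert (get_card_rank card) (d.getD (get_card_rank card) 0 + 1)) PySem.Dict.empty

def pvBStep (counts : PySem.Dict String Int) (p : PySem.Set String × List String)
    (card : String) : PySem.Set String × List String :=
  let r := get_card_rank card
  (p.1.add r,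
   if PySem.Int.mod (counts.getD r 0) 2 = 1 ∧ r ∉ p.1 then p.2 ++ [card] else p.2)

def organize_hand_alt (hand : List String) : List String :=
  let counts := pvCounts hand
  ((hand.reverse.foldl (pvBStep counts) (PySem.Set.empty, [])).2).reverse

-- ===== PRECONDITION & SPEC =====
def Spec_organize_hand (hand : List String) (out : List String) : Prop := out = organize_hand_alt hand
instance (hand : List String) (out : List String) : Decidable (Spec_organize_hand hand out) := by unfold Spec_organize_hand; infer_instance

-- ===== CLAIM (what is proved, stated in full; the proofs are below) =====
def Claim_equal_organize_hand : Prop := ∀ (hand : List String), Dom_organize_hand hand → Spec_organize_hand hand (organize_hand hand)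

-- ===== LEMMAS AND PROOFS =====

-- value at a (Nat) position of the rank list
def vAt (num : List String) (q : Nat) : String := num.getD q ""
-- q and p are consecutive occurrences of the same rank
def pvAdj (num : List String) (q p : Nat) : Prop :=
  q < p ∧ vAt num q = vAt num p ∧ ∀ t, q < t → t < p → vAt num t ≠ vAt num q
-- occurrences of rank-at-q strictly before q
def cb (num : List String) (q : Nat) : Nat := (num.take q).count (vAt num q)
-- rank at q occurs again later
def pvHasNext (num : List String) (q : Nat) : Prop := vAt num q ∈ num.drop (q + 1)
-- the cards A keeps: last occurrence of a rank with no pair left open (cb even)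
def keepN (num : List String) (q : Nat) : Bool :=
  !decide (vAt num q ∈ num.drop (q + 1)) && decide (cb num q % 2 = 0)
-- characterisation of the pairing set after the outer loop has processed indices < i
def inS (num : List String) (i p : Int) : Prop :=
  0 ≤ p ∧ p < (num.length : Int) ∧
    ((cb num p.toNat % 2 = 0 ∧ pvHasNext num p.toNat ∧ p < i) ∨
     (cb num p.toNat % 2 = 1 ∧ ∃ q : Nat, (q : Int) < i ∧ pvAdj num q p.toNat))

-- canonical middle form: keep the elements whose (absolute) index satisfies P
def idxF (h : List String) (s : Nat) (P : Nat → Bool) : List String :=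
  match h with
  | [] => []
  | c :: t => (if P s then [c] else []) ++ idxF t (s + 1) P

-- B's reverse sweep as a structural recursion (f = the odd-count test)
def gk (f : String → Bool) : List String → PySem.Set String → List String
  | [], _ => []
  | c :: ys, s =>
      (if f (get_card_rank c) && !decide (get_card_rank c ∈ s) then [c] else []) ++
      gk f ys (s.add (get_card_rank c))

-- ---------- small generic lemmas ----------

theorem idxF_all_true (h : List String) (s : Nat) (P : Nat → Bool)
    (hp : ∀ k, s ≤ k → P k = true) : idxF h s P = h := by
  induction h generalizing s with
  | nil => rfl
  | cons c t ih => simp [idxF, hp s le_rfl, ih (s+1) (fun k hk => hp k (by omega))]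

theorem idxF_congr (h : List String) (s : Nat) (P Q : Nat → Bool)
    (hpq : ∀ k, s ≤ k → k < s + h.length → P k = Q k) : idxF h s P = idxF h s Q := by
  induction h generalizing s with
  | nil => rfl
  | cons c t ih =>
      simp only [idxF, hpq s le_rfl (by simp)]
      rw [ih (s+1) (fun k h1 h2 => hpq k (by omega) (by simp at h2 ⊢; omega))]

theorem idxF_append (a b : List String) (s : Nat) (P : Nat → Bool) :
    idxF (a ++ b) s P = idxF a s P ++ idxF b (s + a.length) P := by
  induction a generalizing s with
  | nil => simp [idxF]
  | cons c t ih => simp [idxF, ih (s+1)]; rw [show s + (t.length + 1) = s + 1 + t.length by omega]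

theorem idxF_erase (h : List String) (s m : Nat) (Q : Nat → Bool)
    (hm : m < h.length) (hq : ∀ k, s + m ≤ k → Q k = true) :
    idxF h s (fun k => !decide (k = s + m) && Q k) = idxF (h.eraseIdx m) s Q := by
  induction h generalizing s m with
  | nil => simp at hm
  | cons c t ih =>
      cases m with
      | zero =>
          simp only [List.eraseIdx_cons_zero, idxF]
          simp only [show (!decide (s = s + 0) && Q s) = false by simp, Bool.false_eq_true,
            if_false, List.nil_append]
          rw [idxF_all_true t (s+1) _ (fun k hk => by
                simp [hq k (by omega)]; omega),
              idxF_all_true t s Q (fun k hk => hq k (by omega))]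
      | succ m' =>
          simp only [List.eraseIdx_cons_succ, idxF]
          simp only [show (!decide (s = s + (m' + 1)) && Q s) = Q s by simp]
          have h2 := ih (s+1) m' (by simpa using hm) (fun k hk => hq k (by omega))
          rw [show (fun k => !decide (k = s + 1 + m') && Q k)
                = (fun k => !decide (k = s + (m' + 1)) && Q k) by funext k; ring_nf] at h2
          rw [h2]

-- popping a strictly descending list of valid indices = filtering those indices out
theorem popAll_desc (l : List Int) (h : List String)
    (hd : l.Pairwise (· > ·)) (hb : ∀ x ∈ l, 0 ≤ x ∧ x < (h.length : Int)) :
    pvPopAll h l = idxF h 0 (fun k => !decide ((k : Int) ∈ l)) := by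
  induction l generalizing h with
  | nil =>
      rw [idxF_all_true h 0 _ (fun k _ => by simp)]
      rfl
  | cons m rest ih =>
      have hm0 : 0 ≤ m := (hb m (by simp)).1
      have hmlt : m < (h.length : Int) := (hb m (by simp)).2
      have hmn : m.toNat < h.length := by omega
      have hpop : PySem.List.pop? h m = some (h[m.toNat], h.eraseIdx m.toNat) := by
        have hc := PySem.List.pop?_natCast h m.toNat hmn
        rw [show ((m.toNat : Nat) : Int) = m by omega] at hc
        exact hc
      have hrest : pvPopAll (h.eraseIdx m.toNat) rest
          = idxF (h.eraseIdx m.toNat) 0 (fun k => !decide ((k : Int) ∈ rest)) := by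
        refine ih (h.eraseIdx m.toNat) (List.Pairwise.of_cons hd) ?_
        intro x hx
        have hxm : m > x := List.rel_of_pairwise_cons hd hx
        have hx0 := (hb x (List.mem_cons_of_mem _ hx)).1
        have hlen : (h.eraseIdx m.toNat).length = h.length - 1 := by
          simp [List.length_eraseIdx, hmn]
        rw [hlen]
        exact ⟨hx0, by omega⟩
      have hfun : (fun (k : Nat) => !decide ((k : Int) ∈ m :: rest))
          = (fun (k : Nat) => !decide (k = 0 + m.toNat) && !decide ((k : Int) ∈ rest)) := by
        funext k
        rcases eq_or_ne ((k : Int)) m with hk | hk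
        · rw [decide_eq_true (show (k : Int) ∈ m :: rest from by simp [hk]),
              decide_eq_true (show k = 0 + m.toNat from by omega)]
          simp
        · have hiff : ((k : Int) ∈ m :: rest) ↔ ((k : Int) ∈ rest) := by simp [hk]
          rw [decide_eq_decide.mpr hiff, decide_eq_false (show ¬ (k = 0 + m.toNat) from by omega)]
          · simp
          · infer_instance
      rw [hfun, idxF_erase h 0 m.toNat _ hmn (fun k hk => by
        simp only [Bool.not_eq_true', decide_eq_false_iff_not]
        intro hmem
        have := List.rel_of_pairwise_cons hd hmem
        omega)]
      show List.foldl _ h (m :: rest) = _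
      simp only [List.foldl_cons, hpop]
      exact hrest

-- ---------- occurrence structure lemmas ----------

theorem pvAdj_unique_left (num : List String) (q q' p : Nat)
    (h1 : pvAdj num q p) (h2 : pvAdj num q' p) : q = q' := by
  obtain ⟨hqp, hvq, hbet⟩ := h1
  obtain ⟨hq'p, hvq', hbet'⟩ := h2
  rcases lt_trichotomy q q' with h | h | h
  · exact absurd (hvq'.trans hvq.symm) (hbet q' h hq'p)
  · exact h
  · exact absurd (hvq.trans hvq'.symm) (hbet' q h hqp)

theorem pvAdj_unique_right (num : List String) (q p p' : Nat)
    (h1 : pvAdj num q p) (h2 : pvAdj num q p') : p = p' := by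
  obtain ⟨hqp, hvq, hbet⟩ := h1
  obtain ⟨hqp', hvq', hbet'⟩ := h2
  rcases lt_trichotomy p p' with h | h | h
  · exact absurd hvq.symm (hbet' p hqp h)
  · exact h
  · exact absurd hvq'.symm (hbet p' hqp' h)

theorem cb_pvAdj (num : List String) (q p : Nat) (hq : q < num.length)
    (h : pvAdj num q p) : cb num p = cb num q + 1 := by
  obtain ⟨hqp, hvq, hbet⟩ := h
  unfold cb
  have hsplit : num.take p = num.take (q + 1) ++ (num.drop (q + 1)).take (p - (q + 1)) := by
    rw [← List.take_add]; congr 1; omega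
  have htq : num.take (q + 1) = num.take q ++ [num[q]] := by
    rw [List.take_add_one, List.getElem?_eq_getElem hq]; rfl
  have hvq' : num[q] = vAt num q := by
    unfold vAt; rw [List.getD_eq_getElem _ _ hq]
  have hmid : ((num.drop (q + 1)).take (p - (q + 1))).count (vAt num p) = 0 := by
    rw [List.count_eq_zero]
    intro hcmem
    obtain ⟨i, hi, hgi⟩ := List.mem_iff_getElem.mp hcmem
    have hlen : i < p - (q + 1) ∧ q + 1 + i < num.length := by
      simp only [List.length_take, List.length_drop] at hi; omega
    rw [List.getElem_take, List.getElem_drop] at hgi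
    have hvt : vAt num (q + 1 + i) = vAt num p := by
      unfold vAt; rw [List.getD_eq_getElem _ _ hlen.2]; exact hgi
    exact hbet (q + 1 + i) (by omega) (by omega) (hvt.trans hvq.symm)
  rw [hsplit, List.count_append, hmid, htq, List.count_append, ← hvq]
  simp [hvq']

theorem exists_prev_of_cb_pos (num : List String) (p : Nat) (hp : p < num.length)
    (h : cb num p ≠ 0) : ∃ q, pvAdj num q p := by
  classical
  have hmem : vAt num p ∈ num.take p := by
    by_contra hc
    exact h (List.count_eq_zero.mpr hc)
  obtain ⟨i, hi, hgi⟩ := List.mem_iff_getElem.mp hmem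
  have hilen : i < p ∧ i < num.length := by
    simp only [List.length_take] at hi; omega
  have hPi : i < p ∧ vAt num i = vAt num p := by
    refine ⟨hilen.1, ?_⟩
    rw [List.getElem_take] at hgi
    unfold vAt
    rw [List.getD_eq_getElem _ _ hilen.2]
    exact hgi
  have hspec : (fun t => t < p ∧ vAt num t = vAt num p) (Nat.findGreatest (fun t => t < p ∧ vAt num t = vAt num p) p) :=
    Nat.findGreatest_spec (P := fun t => t < p ∧ vAt num t = vAt num p) (le_of_lt hPi.1) hPi
  refine ⟨Nat.findGreatest (fun t => t < p ∧ vAt num t = vAt num p) p, hspec.1, hspec.2, ?_⟩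
  intro t hqt htp hveq
  have hgr := Nat.findGreatest_is_greatest hqt (le_of_lt htp)
  exact hgr ⟨htp, hveq.trans hspec.2⟩

theorem exists_adj_of_hasNext (num : List String) (q : Nat) (hq : q < num.length)
    (h : pvHasNext num q) : ∃ p, pvAdj num q p ∧ p < num.length := by
  have hex : ∃ t, q < t ∧ t < num.length ∧ vAt num t = vAt num q := by
    unfold pvHasNext at h
    obtain ⟨i, hi, hgi⟩ := List.mem_iff_getElem.mp h
    refine ⟨q + 1 + i, by omega, ?_, ?_⟩
    · simp only [List.length_drop] at hi; omega
    · rw [List.getElem_drop] at hgi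
      unfold vAt
      rw [List.getD_eq_getElem _ _ (by simp only [List.length_drop] at hi; omega)]
      exact hgi
  classical
  have hspec := Nat.find_spec hex
  refine ⟨Nat.find hex, ⟨hspec.1, hspec.2.2.symm, ?_⟩, hspec.2.1⟩
  intro t hqt htl hveq
  have hfle : Nat.find hex ≤ t := Nat.find_le ⟨hqt, by
    have hlt : t < Nat.find hex := htl
    have := hspec.2.1
    omega, hveq⟩
  omega

theorem hasNext_of_lt_eq (num : List String) (q p : Nat) (hp : p < num.length)
    (hqp : q < p) (hvq : vAt num q = vAt num p) : pvHasNext num q := by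
  unfold pvHasNext
  rw [hvq]
  have hlen : p - (q + 1) < (num.drop (q + 1)).length := by
    simp only [List.length_drop]; omega
  have hget : (num.drop (q + 1))[p - (q + 1)] = num[p] := by
    rw [List.getElem_drop]; congr 1; omega
  have hv : vAt num p = num[p] := by
    unfold vAt; rw [List.getD_eq_getElem _ _ hp]
  rw [hv, ← hget]
  exact List.getElem_mem hlen

theorem hasNext_of_pvAdj (num : List String) (q p : Nat) (hp : p < num.length)
    (h : pvAdj num q p) : pvHasNext num q :=
  hasNext_of_lt_eq num q p hp h.1 h.2.1

-- ---------- inner loop lemmas ----------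

theorem inner_noop_mem (num : List String) (i : Int) (S : PySem.Set Int) (js : List Int)
    (h : i ∈ S) : js.foldl (pvInnerStep num i) S = S := by
  induction js with
  | nil => rfl
  | cons j t ih =>
      have hstep : pvInnerStep num i S j = S := by
        unfold pvInnerStep; rw [if_neg]; tauto
      simp only [List.foldl_cons, hstep]; exact ih

theorem inner_noop_noval (num : List String) (i : Int) (S : PySem.Set Int) (js : List Int) :
    (∀ j ∈ js, PySem.List.pyGetD num i "" ≠ PySem.List.pyGetD num j "") →
    js.foldl (pvInnerStep num i) S = S := by
  induction js with
  | nil => intro _; rfl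
  | cons j t ih =>
      intro h
      have hstep : pvInnerStep num i S j = S := by
        unfold pvInnerStep
        split_ifs with h1 h2
        · exact absurd h2 (h j (by simp))
        · rfl
        · rfl
      simp only [List.foldl_cons, hstep]
      exact ih (fun x hx => h x (List.mem_cons_of_mem _ hx))

theorem nodup_inner (num : List String) (i : Int) (S : PySem.Set Int) (js : List Int)
    (h : S.Nodup) : (js.foldl (pvInnerStep num i) S).Nodup := by
  induction js generalizing S with
  | nil => exact h
  | cons j t ih =>
      apply ih
      simp only [pvInnerStep]
      split_ifs <;> first
        | exact h
        | exact PySem.Set.nodup_add _ _ (PySem.Set.nodup_add _ _ h)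

theorem nodup_outer (num : List String) (l : List Int) (S : PySem.Set Int)
    (h : S.Nodup) : (l.foldl (pvOuterStep num) S).Nodup := by
  induction l generalizing S with
  | nil => exact h
  | cons i t ih => exact ih _ (nodup_inner num i S _ h)

theorem nodup_repeatSet (num : List String) : (pvRepeatSet num).Nodup := by
  exact nodup_outer num _ _ List.nodup_nil

theorem pyGetD_vAt (num : List String) (j : Int) (hj : 0 ≤ j) :
    PySem.List.pyGetD num j "" = vAt num j.toNat := by
  have h1 : PySem.List.pyGetD num ((j.toNat : Nat) : Int) "" = num.getD j.toNat "" :=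
    PySem.List.pyGetD_natCast num j.toNat ""
  rw [show ((j.toNat : Nat) : Int) = j by omega] at h1
  exact h1

theorem inS_mono (num : List String) (i i' p : Int) (hii : i ≤ i')
    (h : inS num i p) : inS num i' p := by
  obtain ⟨h0, hlt, hc⟩ := h
  refine ⟨h0, hlt, ?_⟩
  rcases hc with ⟨he, hn, hpi⟩ | ⟨ho, q, hq, hadj⟩
  · exact Or.inl ⟨he, hn, by omega⟩
  · exact Or.inr ⟨ho, q, by omega, hadj⟩

theorem mem_add2 (S : PySem.Set Int) (x y p : Int) :
    p ∈ (S.add x).add y ↔ p ∈ S ∨ p = x ∨ p = y := by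
  rw [PySem.Set.mem_add, PySem.Set.mem_add]
  tauto

-- the inner loop advances the invariant by one outer index
theorem inner_main (num : List String) (i : Nat) (hi : i < num.length) (S : PySem.Set Int)
    (hS : ∀ p, p ∈ S ↔ inS num (i : Int) p) :
    ∀ p, p ∈ (PySem.List.pyRange ((i : Int) + 1) (PySem.List.len num) 1).foldl
            (pvInnerStep num (i : Int)) S ↔ inS num ((i : Int) + 1) p := by
  have hlen := PySem.List.len_eq num
  by_cases hodd : cb num i % 2 = 1
  · -- index i is already paired with an earlier occurrence: loop is a no-op
    have hiS : (i : Int) ∈ S := by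
      rw [hS]
      refine ⟨by omega, by exact_mod_cast hi, Or.inr ?_⟩
      simp only [Int.toNat_natCast]
      obtain ⟨q, hadj⟩ := exists_prev_of_cb_pos num i hi (by omega)
      exact ⟨hodd, q, by exact_mod_cast hadj.1, hadj⟩
    rw [inner_noop_mem num _ S _ hiS]
    intro p
    rw [hS p]
    constructor
    · exact inS_mono num _ _ p (by omega)
    · rintro ⟨h0, hlt, hc⟩
      refine ⟨h0, hlt, ?_⟩
      rcases hc with ⟨he, hn, hpi⟩ | ⟨ho, q, hq, hadj⟩
      · left
        refine ⟨he, hn, ?_⟩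
        rcases lt_or_eq_of_le (by omega : p ≤ (i : Int)) with h | h
        · exact h
        · exfalso
          rw [h] at he
          simp only [Int.toNat_natCast] at he
          omega
      · right
        refine ⟨ho, q, ?_, hadj⟩
        rcases lt_or_eq_of_le (by omega : (q : Int) ≤ (i : Int)) with h | h
        · exact h
        · exfalso
          have hqi : q = i := by exact_mod_cast h
          subst hqi
          have hcb := cb_pvAdj num q p.toNat hi hadj
          omega
  · -- cb i even: i is still unpaired when the outer loop reaches it
    have heven : cb num i % 2 = 0 := by omega
    have hiS : (i : Int) ∉ S := by
      rw [hS]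
      rintro ⟨h0, hlt, hc⟩
      simp only [Int.toNat_natCast] at hc
      rcases hc with ⟨he, hn, hpi⟩ | ⟨ho, _⟩
      · omega
      · omega
    by_cases hnext : pvHasNext num i
    · -- there is a next occurrence pn: the inner loop pairs i with pn
      obtain ⟨pn, hadj, hpn⟩ := exists_adj_of_hasNext num i hi hnext
      have hcbpn : cb num pn = cb num i + 1 := cb_pvAdj num i pn hi hadj
      have hpnS : (pn : Int) ∉ S := by
        rw [hS]
        rintro ⟨h0, hlt, hc⟩
        simp only [Int.toNat_natCast] at hc
        rcases hc with ⟨he, _, _⟩ | ⟨ho, q, hq, hadj'⟩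
        · omega
        · have hqi : q = i := pvAdj_unique_left num q i pn hadj' hadj
          omega
      have hsplit : PySem.List.pyRange ((i : Int) + 1) (PySem.List.len num) 1
          = PySem.List.pyRange ((i : Int) + 1) (pn : Int) 1
            ++ PySem.List.pyRange (pn : Int) (PySem.List.len num) 1 :=
        PySem.List.pyRange_one_append _ _ _ (by exact_mod_cast hadj.1)
          (by rw [hlen]; exact_mod_cast hpn.le)
      rw [hsplit, List.foldl_append]
      have hseg1 : (PySem.List.pyRange ((i : Int) + 1) (pn : Int) 1).foldl
          (pvInnerStep num (i : Int)) S = S := by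
        apply inner_noop_noval
        intro j hj
        rw [PySem.List.mem_pyRange_one] at hj
        rw [pyGetD_vAt num _ (by omega), pyGetD_vAt num _ (by omega)]
        simp only [Int.toNat_natCast]
        intro heq
        exact hadj.2.2 j.toNat (by omega) (by omega) heq.symm
      rw [hseg1, PySem.List.pyRange_one_cons (by rw [hlen]; exact_mod_cast hpn),
        List.foldl_cons]
      have hstep : pvInnerStep num (i : Int) S (pn : Int) = (S.add (i : Int)).add (pn : Int) := by
        have hveq : PySem.List.pyGetD num (i : Int) "" = PySem.List.pyGetD num (pn : Int) "" := by
          rw [pyGetD_vAt num _ (by omega), pyGetD_vAt num _ (by omega)]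
          simp only [Int.toNat_natCast]
          exact hadj.2.1
        unfold pvInnerStep
        rw [if_pos ⟨hiS, hpnS⟩, if_pos hveq]
      rw [hstep, inner_noop_mem num _ _ _
        (show (i : Int) ∈ (S.add (i : Int)).add (pn : Int) by rw [mem_add2]; tauto)]
      intro p
      rw [mem_add2]
      constructor
      · rintro (hp | hp | hp)
        · exact inS_mono num _ _ p (by omega) ((hS p).mp hp)
        · subst hp
          refine ⟨by omega, by exact_mod_cast hi, Or.inl ?_⟩
          simp only [Int.toNat_natCast]
          exact ⟨heven, hnext, by omega⟩
        · subst hp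
          refine ⟨by omega, by exact_mod_cast hpn, Or.inr ?_⟩
          simp only [Int.toNat_natCast]
          exact ⟨by omega, i, by omega, hadj⟩
      · rintro ⟨h0, hlt, hc⟩
        rcases hc with ⟨he, hn, hpi⟩ | ⟨ho, q, hq, hadj'⟩
        · rcases lt_or_eq_of_le (by omega : p ≤ (i : Int)) with hlt' | heq'
          · exact Or.inl ((hS p).mpr ⟨h0, hlt, Or.inl ⟨he, hn, hlt'⟩⟩)
          · exact Or.inr (Or.inl heq')
        · rcases lt_or_eq_of_le (by omega : (q : Int) ≤ (i : Int)) with hlt' | heq'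
          · exact Or.inl ((hS p).mpr ⟨h0, hlt, Or.inr ⟨ho, q, hlt', hadj'⟩⟩)
          · have hqi : q = i := by exact_mod_cast heq'
            subst hqi
            have hppn : p.toNat = pn := pvAdj_unique_right num q p.toNat pn hadj' hadj
            right; right; omega
    · -- no next occurrence: the inner loop finds no partner
      have hnoop : (PySem.List.pyRange ((i : Int) + 1) (PySem.List.len num) 1).foldl
          (pvInnerStep num (i : Int)) S = S := by
        apply inner_noop_noval
        intro j hj
        rw [PySem.List.mem_pyRange_one] at hj
        rw [pyGetD_vAt num _ (by omega), pyGetD_vAt num _ (by omega)]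
        simp only [Int.toNat_natCast]
        intro heq
        have hjlen : j.toNat < num.length := by rw [hlen] at hj; omega
        exact hnext (hasNext_of_lt_eq num i j.toNat hjlen (by omega) heq)
      rw [hnoop]
      intro p
      rw [hS p]
      constructor
      · exact inS_mono num _ _ p (by omega)
      · rintro ⟨h0, hlt, hc⟩
        refine ⟨h0, hlt, ?_⟩
        rcases hc with ⟨he, hn, hpi⟩ | ⟨ho, q, hq, hadj'⟩
        · left
          refine ⟨he, hn, ?_⟩
          rcases lt_or_eq_of_le (by omega : p ≤ (i : Int)) with h | h
          · exact h
          · exfalso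
            rw [h] at hn
            simp only [Int.toNat_natCast] at hn
            exact hnext hn
        · right
          refine ⟨ho, q, ?_, hadj'⟩
          rcases lt_or_eq_of_le (by omega : (q : Int) ≤ (i : Int)) with h | h
          · exact h
          · exfalso
            have hqi : q = i := by exact_mod_cast h
            subst hqi
            exact hnext (hasNext_of_pvAdj num q p.toNat (by omega) hadj')

theorem outer_rec (num : List String) (m i : Nat) (S : PySem.Set Int)
    (hin : i + m = num.length) (hS : ∀ p, p ∈ S ↔ inS num (i : Int) p) :
    ∀ p, p ∈ (PySem.List.pyRange (i : Int) (PySem.List.len num) 1).foldl (pvOuterStep num) S ↔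
      inS num (num.length : Int) p := by
  have hlen := PySem.List.len_eq num
  induction m generalizing i S with
  | zero =>
      have hi : i = num.length := by omega
      subst hi
      rw [PySem.List.pyRange_one_eq_nil (by rw [hlen])]
      exact hS
  | succ m ih =>
      have hi : i < num.length := by omega
      rw [PySem.List.pyRange_one_cons (by rw [hlen]; exact_mod_cast hi), List.foldl_cons]
      have hmid := inner_main num i hi S hS
      have hS' : ∀ p, p ∈ pvOuterStep num S (i : Int) ↔ inS num ((i + 1 : Nat) : Int) p := by
        intro p
        rw [show ((i + 1 : Nat) : Int) = (i : Int) + 1 by push_cast; ring]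
        exact hmid p
      have hrec := ih (i + 1) (pvOuterStep num S (i : Int)) (by omega) hS'
      rwa [show ((i + 1 : Nat) : Int) = (i : Int) + 1 by push_cast; ring] at hrec

theorem keepN_eq_false_iff (num : List String) (q : Nat) :
    keepN num q = false ↔ (pvHasNext num q ∨ cb num q % 2 = 1) := by
  unfold keepN pvHasNext
  rcases Nat.mod_two_eq_zero_or_one (cb num q) with h | h <;>
    by_cases hm : vAt num q ∈ num.drop (q + 1) <;> simp [h, hm]

theorem repeatSet_mem (num : List String) (p : Int) :
    p ∈ pvRepeatSet num ↔ 0 ≤ p ∧ p < (num.length : Int) ∧ keepN num p.toNat = false := by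
  have hbase : ∀ r : Int, r ∈ (PySem.Set.empty : PySem.Set Int) ↔ inS num ((0 : Nat) : Int) r := by
    intro r
    constructor
    · intro h
      exact absurd h (List.not_mem_nil)
    · rintro ⟨h0, hlt, hc⟩
      rcases hc with ⟨_, _, hpi⟩ | ⟨_, q, hq, _⟩
      · exact absurd hpi (by omega)
      · exact absurd hq (by omega)
  have hfin := outer_rec num num.length 0 PySem.Set.empty (by omega) hbase p
  rw [show ((0 : Nat) : Int) = (0 : Int) by norm_num] at hfin
  unfold pvRepeatSet
  rw [hfin]
  constructor
  · rintro ⟨h0, hlt, hc⟩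
    refine ⟨h0, hlt, (keepN_eq_false_iff num p.toNat).mpr ?_⟩
    rcases hc with ⟨_, hn, _⟩ | ⟨ho, _⟩
    · exact Or.inl hn
    · exact Or.inr ho
  · rintro ⟨h0, hlt, hk⟩
    refine ⟨h0, hlt, ?_⟩
    rcases (keepN_eq_false_iff num p.toNat).mp hk with hn | ho
    · rcases Nat.mod_two_eq_zero_or_one (cb num p.toNat) with he | he
      · exact Or.inl ⟨he, hn, hlt⟩
      · obtain ⟨q, hadj⟩ := exists_prev_of_cb_pos num p.toNat (by omega) (by omega)
        exact Or.inr ⟨he, q, by have := hadj.1; omega, hadj⟩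
    · obtain ⟨q, hadj⟩ := exists_prev_of_cb_pos num p.toNat (by omega) (by omega)
      exact Or.inr ⟨ho, q, by have := hadj.1; omega, hadj⟩

-- ---------- A's pipeline ----------

theorem A_eq_idxF (hand : List String) :
    organize_hand hand = idxF hand 0 (fun k => keepN (hand.map get_card_rank) k) := by
  classical
  set num := hand.map get_card_rank with hnum
  have hnl : num.length = hand.length := by simp [hnum]
  set descL : List Int :=
    (((List.range hand.length).filter (fun k => !keepN num k)).reverse).map
      (fun (k : Nat) => (k : Int)) with hdesc
  have hmemD : ∀ p : Int,
      p ∈ descL ↔ 0 ≤ p ∧ p < (num.length : Int) ∧ keepN num p.toNat = false := by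
    intro p
    simp only [hdesc, List.mem_map, List.mem_reverse, List.mem_filter, List.mem_range]
    constructor
    · rintro ⟨k, ⟨hk, hkeep⟩, rfl⟩
      refine ⟨by omega, by rw [hnl]; exact_mod_cast hk, ?_⟩
      simp only [Int.toNat_natCast]
      simpa using hkeep
    · rintro ⟨h0, hlt, hk⟩
      refine ⟨p.toNat, ⟨by rw [hnl] at hlt; omega, by simpa using hk⟩, by omega⟩
  have hpairD : descL.Pairwise (· > ·) := by
    apply List.Pairwise.map (R := fun (a b : Nat) => a > b) (fun (k : Nat) => (k : Int))
      (fun a b hab => by simpa using (by exact_mod_cast hab : (a : Int) > (b : Int)))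
    rw [List.pairwise_reverse]
    exact List.Pairwise.filter _ List.pairwise_lt_range
  have hnodD : descL.Nodup := by
    apply List.Nodup.map (fun a b h => by exact_mod_cast h)
    rw [List.nodup_reverse]
    exact (List.nodup_range).filter _
  have hsorted : PySem.List.sorted (pvRepeatSet num) (fun x => x) true = descL := by
    apply PySem.List.sorted_rev_eq_of_perm_of_pairwise_gt
    · rw [List.perm_ext_iff_of_nodup hnodD (nodup_repeatSet num)]
      intro p
      rw [hmemD p, repeatSet_mem num p]
    · exact hpairD
  show pvPopAll hand (PySem.List.sorted (pvRepeatSet num) (fun x => x) true) = _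
  rw [hsorted, popAll_desc descL hand hpairD (fun x hx => by
    have := (hmemD x).mp hx
    exact ⟨this.1, by rw [← hnl]; exact this.2.1⟩)]
  apply idxF_congr
  intro k _ hkl
  simp only [Nat.zero_add] at hkl
  cases hkn : keepN num k with
  | false =>
      have hmem : (k : Int) ∈ descL := (hmemD _).mpr
        ⟨by omega, by rw [hnl]; exact_mod_cast hkl, by simpa using hkn⟩
      simp [hmem]
  | true =>
      have hmem : ¬ ((k : Int) ∈ descL) := by
        intro hmem
        have hh := (hmemD _).mp hmem
        simp only [Int.toNat_natCast] at hh
        rw [hkn] at hh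
        exact absurd hh.2.2 (by simp)
      simp [hmem]

-- ---------- B's pipeline ----------

theorem foldB_snd (counts : PySem.Dict String Int) (ys : List String)
    (s : PySem.Set String) (acc : List String) :
    (ys.foldl (pvBStep counts) (s, acc)).2
      = acc ++ gk (fun r => decide (PySem.Int.mod (counts.getD r 0) 2 = 1)) ys s := by
  induction ys generalizing s acc with
  | nil => simp [gk]
  | cons c ys ih =>
      simp only [List.foldl_cons, pvBStep]
      rw [ih]
      simp only [gk]
      by_cases h1 : PySem.Int.mod (counts.getD (get_card_rank c) 0) 2 = 1
      · by_cases h2 : get_card_rank c ∈ s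
        · rw [if_neg (by tauto)]
          simp only [decide_eq_true h2]
          simp
        · rw [if_pos ⟨h1, h2⟩]
          simp only [decide_eq_true h1, decide_eq_false h2]
          simp
      · rw [if_neg (by tauto)]
        simp only [decide_eq_false h1]
        simp

theorem gk_rev_eq_idxF (f : String → Bool) (ys : List String) (s : PySem.Set String) :
    (gk f ys s).reverse
      = idxF ys.reverse 0 (fun k =>
          f (get_card_rank (ys.reverse.getD k "")) &&
          !decide (get_card_rank (ys.reverse.getD k "") ∈ s) &&
          !decide (get_card_rank (ys.reverse.getD k "")
                    ∈ (ys.reverse.drop (k + 1)).map get_card_rank)) := by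
  induction ys generalizing s with
  | nil => simp [gk, idxF]
  | cons c t ih =>
      rw [show gk f (c :: t) s
          = (if f (get_card_rank c) && !decide (get_card_rank c ∈ s) then [c] else [])
            ++ gk f t (s.add (get_card_rank c)) from rfl]
      rw [List.reverse_append, List.reverse_cons, idxF_append]
      congr 1
      · rw [ih (s.add (get_card_rank c))]
        apply idxF_congr
        intro k _ hk
        simp only [Nat.zero_add] at hk
        have hk' : k < t.reverse.length := hk
        have hgetD : (t.reverse ++ [c]).getD k "" = t.reverse.getD k "" :=
          List.getD_append _ _ _ _ hk'
        have hdrop : (t.reverse ++ [c]).drop (k + 1) = t.reverse.drop (k + 1) ++ [c] :=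
          List.drop_append_of_le_length (by omega)
        rw [hgetD, hdrop]
        simp [PySem.Set.mem_add, List.map_append,
          Bool.and_comm, Bool.and_left_comm, Bool.and_assoc]
      · simp only [idxF, Nat.zero_add, List.append_nil]
        have hgetD : (t.reverse ++ [c]).getD t.reverse.length "" = c := by
          rw [List.getD_append_right _ _ _ _ (le_refl _)]
          simp
        have hdrop : (t.reverse ++ [c]).drop (t.reverse.length + 1) = [] :=
          List.drop_eq_nil_of_le (by simp)
        rw [hgetD, hdrop]
        split_ifs with h h' <;> simp_all

theorem count_split (num : List String) (k : Nat) (hk : k < num.length) :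
    num.count (vAt num k) = cb num k + 1 + (num.drop (k + 1)).count (vAt num k) := by
  generalize hv : vAt num k = v
  have hvk : v = num[k] := by
    rw [← hv]; unfold vAt; rw [List.getD_eq_getElem _ _ hk]
  unfold cb
  rw [hv]
  conv_lhs => rw [← List.take_append_drop (k + 1) num]
  have htq : num.take (k + 1) = num.take k ++ [num[k]] := by
    rw [List.take_add_one, List.getElem?_eq_getElem hk]; rfl
  rw [List.count_append, htq, List.count_append, hvk]
  simp

theorem B_eq_idxF (hand : List String) :
    organize_hand_alt hand = idxF hand 0 (fun k => keepN (hand.map get_card_rank) k) := by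
  classical
  set num := hand.map get_card_rank with hnum
  have hnl : num.length = hand.length := by simp [hnum]
  have hcounts : ∀ r, (pvCounts hand).getD r 0 = (num.count r : Int) := by
    intro r
    have h1 : pvCounts hand
        = num.foldl (fun d x => d.insert x (d.getD x 0 + 1)) PySem.Dict.empty := by
      unfold pvCounts
      rw [hnum, List.foldl_map]
    rw [h1, PySem.Dict.getD_foldl_insert_add_one, PySem.Dict.getD_empty]
    ring
  show ((hand.reverse.foldl (pvBStep (pvCounts hand)) (PySem.Set.empty, [])).2).reverse = _
  rw [foldB_snd, List.nil_append, gk_rev_eq_idxF, List.reverse_reverse]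
  apply idxF_congr
  intro k _ hk
  simp only [Nat.zero_add] at hk
  have hkn : k < num.length := by omega
  have hv : get_card_rank (hand.getD k "") = vAt num k := by
    unfold vAt
    rw [List.getD_eq_getElem _ _ hkn, List.getD_eq_getElem _ _ hk]
    simp [hnum]
  have hdropmap : (hand.drop (k + 1)).map get_card_rank = num.drop (k + 1) := by
    simp [hnum, List.map_drop]
  rw [hv, hcounts, hdropmap]
  have hmod : (PySem.Int.mod ((num.count (vAt num k) : Int)) 2 = 1)
      ↔ num.count (vAt num k) % 2 = 1 := by
    unfold PySem.Int.mod
    rw [Int.fmod_eq_emod]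
    simp
    omega
  have hsplit := count_split num k hkn
  unfold keepN
  by_cases hm : vAt num k ∈ num.drop (k + 1)
  · simp [hm]
  · have hc0 : (num.drop (k + 1)).count (vAt num k) = 0 := List.count_eq_zero.mpr hm
    have hiff : num.count (vAt num k) % 2 = 1 ↔ cb num k % 2 = 0 := by omega
    have h1 : decide (PySem.Int.mod ((num.count (vAt num k) : Int)) 2 = 1)
        = decide (cb num k % 2 = 0) := by
      exact decide_eq_decide.mpr (hmod.trans hiff)
    simp [hm, PySem.Set.empty]
    omega

-- ===== VERDICT (by name: the statement is the Claim_ definition above) =====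
theorem organize_hand_spec : Claim_equal_organize_hand := by
  intro hand _
  unfold Spec_organize_hand
  rw [A_eq_idxF, B_eq_idxF]
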